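-- pv_equiv track=rewrite | github.com/DrShIkIgAmy/CodeRockBattle | tasks/task_11.py | is_D_hurt
-- ===== SOURCE A (Python) =====
-- def is_D_hurt(coord_D, coord_W, bound):
--     x_inc = 1 if coord_W[0] < coord_D[0] else -1
--     y_inc = 1 if coord_W[1] < coord_D[1] else -1
--     cur_coord = [coord_W[0], coord_W[1]]
--     while True:
--         if cur_coord[0] == coord_D[0] and cur_coord[1] == coord_D[1]:
--             return True
--         cur_coord = [cur_coord[0] + x_inc, cur_coord[1] + y_inc]
--         if cur_coord[0] < 0 or cur_coord[0] >= bound[0] \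
--                 or cur_coord[1] < 0 or cur_coord[1] >= bound[1]:
--             return False
-- ===== SOURCE B (Python) =====
-- def is_D_hurt(coord_D, coord_W, bound):
--     # Closed form: D is hit iff it lies on the diagonal ray from W and, unless D == W,
--     # the first step and D itself are inside the bounds (the path is monotone).
--     xi = 1 if coord_W[0] < coord_D[0] else -1
--     yi = 1 if coord_W[1] < coord_D[1] else -1
--     kx = (coord_D[0] - coord_W[0]) * xi
--     ky = (coord_D[1] - coord_W[1]) * yi
--     if kx != ky:
--         return False
--     if kx == 0:
--         return True
--     x1 = coord_W[0] + xi
--     y1 = coord_W[1] + yi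
--     return (0 <= x1 < bound[0] and 0 <= y1 < bound[1]
--             and 0 <= coord_D[0] < bound[0] and 0 <= coord_D[1] < bound[1])
-- ===== Notes on version B (the rewrite author's own statement) =====
-- stated objective: alternative
-- what changed: Replaces A's step-by-step diagonal walk with a closed-form test: D is reached iff it lies on the diagonal ray from W (equal step counts on both axes) and, unless D == W, the first step point and D itself are inside the bounds (the walk is monotone, so its endpoints being in-bounds implies all of it is).
-- outside the precondition, e.g. on is_D_hurt([1, 2], [1, 2], []): A returns True, B returns True
import Mathlib
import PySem

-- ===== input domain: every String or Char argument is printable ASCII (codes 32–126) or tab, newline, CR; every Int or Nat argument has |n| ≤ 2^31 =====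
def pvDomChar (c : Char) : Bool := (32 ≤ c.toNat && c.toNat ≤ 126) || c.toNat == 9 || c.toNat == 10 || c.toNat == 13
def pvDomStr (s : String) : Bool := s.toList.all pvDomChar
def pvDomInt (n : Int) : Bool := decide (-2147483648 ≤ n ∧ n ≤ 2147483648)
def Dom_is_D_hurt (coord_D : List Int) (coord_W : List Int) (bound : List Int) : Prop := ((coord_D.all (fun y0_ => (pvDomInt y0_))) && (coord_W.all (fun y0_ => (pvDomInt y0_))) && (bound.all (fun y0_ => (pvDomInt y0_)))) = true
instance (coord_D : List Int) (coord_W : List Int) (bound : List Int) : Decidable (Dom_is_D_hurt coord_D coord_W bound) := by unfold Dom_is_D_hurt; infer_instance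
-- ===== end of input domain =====

-- B replaces A's step-by-step diagonal walk with a closed-form membership test (alternative algorithm).

-- ===== PORT A =====
-- xs[i] on the Pre_-admitted shapes (length ≥ 2, indices 0/1 in range, so pyGet? is `some`)
def pvGetI (xs : List Int) (i : Int) : Int := (PySem.List.pyGet? xs i).getD 0

-- A's `while True` loop, step for step; the fuel is only a totality guard: the x coordinate
-- moves monotonically by xi ∈ {1,-1}, so the loop exits within (if xi = 1 then b0 - cx else cx + 1) steps.
def isDloop (D0 D1 b0 b1 xi yi : Int) (cx cy : Int) : Nat → Bool
  | 0 => false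
  | fuel + 1 =>
    if cx = D0 ∧ cy = D1 then true
    else
      if cx + xi < 0 ∨ b0 ≤ cx + xi ∨ cy + yi < 0 ∨ b1 ≤ cy + yi then false
      else isDloop D0 D1 b0 b1 xi yi (cx + xi) (cy + yi) fuel

def is_D_hurt (coord_D : List Int) (coord_W : List Int) (bound : List Int) : Bool :=
  let D0 := pvGetI coord_D 0
  let D1 := pvGetI coord_D 1
  let W0 := pvGetI coord_W 0
  let W1 := pvGetI coord_W 1
  let b0 := pvGetI bound 0
  let b1 := pvGetI bound 1
  let xi : Int := if W0 < D0 then 1 else -1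
  let yi : Int := if W1 < D1 then 1 else -1
  isDloop D0 D1 b0 b1 xi yi W0 W1 ((if xi = 1 then b0 - W0 else W0 + 1).toNat + 1)

-- ===== PORT B =====
def is_D_hurt_alt (coord_D : List Int) (coord_W : List Int) (bound : List Int) : Bool :=
  let D0 := pvGetI coord_D 0
  let D1 := pvGetI coord_D 1
  let W0 := pvGetI coord_W 0
  let W1 := pvGetI coord_W 1
  let xi : Int := if W0 < D0 then 1 else -1
  let yi : Int := if W1 < D1 then 1 else -1
  let kx := (D0 - W0) * xi
  let ky := (D1 - W1) * yi
  if kx ≠ ky then false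
  else if kx = 0 then true
  else
    decide (0 ≤ W0 + xi ∧ W0 + xi < pvGetI bound 0 ∧ 0 ≤ W1 + yi ∧ W1 + yi < pvGetI bound 1 ∧
            0 ≤ D0 ∧ D0 < pvGetI bound 0 ∧ 0 ≤ D1 ∧ D1 < pvGetI bound 1)

-- ===== PRECONDITION & SPEC =====
-- Pre_ admits exactly the full two-coordinate shape (each list of length ≥ 2), on which neither
-- program can raise IndexError; it also excludes the corner where coord_D == coord_W and bound is
-- shorter, on which A happens to return True without ever reading bound (B returns True there too).
def Pre_is_D_hurt (coord_D : List Int) (coord_W : List Int) (bound : List Int) : Prop :=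
  2 ≤ coord_D.length ∧ 2 ≤ coord_W.length ∧ 2 ≤ bound.length
instance (coord_D : List Int) (coord_W : List Int) (bound : List Int) : Decidable (Pre_is_D_hurt coord_D coord_W bound) := by unfold Pre_is_D_hurt; infer_instance

def pvWitness_is_D_hurt : List Int × List Int × List Int := ([2, 3], [0, 1], [5, 5])

def Spec_is_D_hurt (coord_D : List Int) (coord_W : List Int) (bound : List Int) (out : Bool) : Prop := out = is_D_hurt_alt coord_D coord_W bound
instance (coord_D : List Int) (coord_W : List Int) (bound : List Int) (out : Bool) : Decidable (Spec_is_D_hurt coord_D coord_W bound out) := by unfold Spec_is_D_hurt; infer_instance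

-- ===== CLAIM (what is proved, stated in full; the proofs are below) =====
def Claim_equal_is_D_hurt : Prop := ∀ (coord_D : List Int) (coord_W : List Int) (bound : List Int), Dom_is_D_hurt coord_D coord_W bound → Pre_is_D_hurt coord_D coord_W bound → Spec_is_D_hurt coord_D coord_W bound (is_D_hurt coord_D coord_W bound)

-- ===== LEMMAS AND PROOFS =====

-- The loop started at (cx, cy), with enough fuel for the x coordinate to leave [0, b0),
-- computes the closed form: D is on the ray (equal nonnegative step counts on both axes) and,
-- unless it is the start point itself, the first step point and D are inside the bounds.
theorem isDloop_closed (D0 D1 b0 b1 xi yi : Int)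
    (hxi : xi = 1 ∨ xi = -1) (hyi : yi = 1 ∨ yi = -1) :
    ∀ (fuel : Nat) (cx cy : Int),
      (if xi = 1 then b0 - cx else cx + 1).toNat + 1 ≤ fuel →
      isDloop D0 D1 b0 b1 xi yi cx cy fuel =
        decide ((D0 - cx) * xi = (D1 - cy) * yi ∧ 0 ≤ (D0 - cx) * xi ∧
          ((D0 - cx) * xi = 0 ∨
            (0 ≤ cx + xi ∧ cx + xi < b0 ∧ 0 ≤ cy + yi ∧ cy + yi < b1 ∧
             0 ≤ D0 ∧ D0 < b0 ∧ 0 ≤ D1 ∧ D1 < b1))) := by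
  intro fuel
  induction fuel with
  | zero => intro cx cy h; exact absurd h (by omega)
  | succ n ih =>
    intro cx cy hfuel
    rw [isDloop]
    split_ifs with h1 h2
    · rcases hxi with rfl | rfl <;> rcases hyi with rfl | rfl <;>
        (obtain ⟨rfl, rfl⟩ := h1; rw [eq_comm, decide_eq_true_iff]) <;>
        simp only [mul_one, mul_neg_one] <;> omega
    · rcases hxi with rfl | rfl <;> rcases hyi with rfl | rfl <;>
        rw [eq_comm, decide_eq_false_iff_not] <;>
        simp only [mul_one, mul_neg_one] at * <;> omega
    · rw [ih (cx + xi) (cy + yi) (by rcases hxi with rfl | rfl <;> simp_all <;> omega),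
        decide_eq_decide]
      rcases hxi with rfl | rfl <;> rcases hyi with rfl | rfl <;>
        simp only [mul_one, mul_neg_one] at * <;> omega

-- ===== VERDICT (by name: the statement is the Claim_ definition above) =====
theorem is_D_hurt_spec : Claim_equal_is_D_hurt := by
  intro coord_D coord_W bound _ _
  unfold Spec_is_D_hurt is_D_hurt is_D_hurt_alt
  set D0 := pvGetI coord_D 0
  set D1 := pvGetI coord_D 1
  set W0 := pvGetI coord_W 0
  set W1 := pvGetI coord_W 1
  set b0 := pvGetI bound 0
  set b1 := pvGetI bound 1
  have hx : (if W0 < D0 then (1 : Int) else -1) = 1 ∨ (if W0 < D0 then (1 : Int) else -1) = -1 := by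
    split <;> simp
  have hy : (if W1 < D1 then (1 : Int) else -1) = 1 ∨ (if W1 < D1 then (1 : Int) else -1) = -1 := by
    split <;> simp
  rw [isDloop_closed D0 D1 b0 b1 _ _ hx hy _ W0 W1 (le_refl _)]
  split_ifs with hw0 hw1 hw1 <;>
    simp only [mul_one, mul_neg_one] <;>
    [skip; skip; skip; skip] <;>
    split_ifs with hk h0 <;>
    first
      | (rw [decide_eq_false_iff_not]; omega)
      | (rw [decide_eq_true_iff]; omega)
      | (rw [decide_eq_decide]; omega)
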